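-- pv_equiv track=rewrite | github.com/ddiyoung-x4/DailyAlgorithm | level_2/구명보트.py | solution
-- ===== SOURCE A (Python) =====
-- def solution(people, limit):
--     answer = 0
--
--     people.sort(reverse=True)
--     boats = []
--     for weight in people:
--         if not boats:
--             boats.append(weight)
--             continue
--
--         if boats[-1] + weight <= limit:
--             boats.pop()
--             answer += 1
--         else:
--             boats.append(weight)
--
--     return answer+len(boats)
-- ===== SOURCE B (Python) =====
-- def solution(people, limit):
--     people.sort(reverse=True)
--     boats = 0
--     i, j = 0, len(people) - 1
--     while i <= j:
--         if people[i] + people[j] <= limit: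
--             j -= 1
--         i += 1
--         boats += 1
--     return boats
-- ===== Notes on version B (the rewrite author's own statement) =====
-- stated objective: idiomatic
-- what changed: Replaced A's push/pop stack of unpaired people by the classic two-pointer greedy over the descending-sorted list (pair heaviest with lightest when feasible), maintaining only two indices and a counter instead of a list of unpaired weights.
import Mathlib
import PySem

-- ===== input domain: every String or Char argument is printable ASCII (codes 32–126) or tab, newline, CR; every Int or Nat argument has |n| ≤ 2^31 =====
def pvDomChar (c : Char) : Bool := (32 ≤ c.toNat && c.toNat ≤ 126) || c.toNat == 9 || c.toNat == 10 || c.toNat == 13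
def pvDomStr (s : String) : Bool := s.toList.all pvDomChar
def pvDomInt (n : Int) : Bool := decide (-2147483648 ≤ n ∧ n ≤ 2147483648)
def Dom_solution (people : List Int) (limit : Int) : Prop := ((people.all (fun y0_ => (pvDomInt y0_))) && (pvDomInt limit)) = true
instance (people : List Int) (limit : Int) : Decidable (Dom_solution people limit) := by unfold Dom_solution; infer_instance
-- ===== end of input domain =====

-- B replaces A's push/pop stack of unpaired people by the classic two-pointer greedy over the
-- descending-sorted list (idiomatic; same O(n log n) cost). Both A and B sort `people` in place
-- (same observable mutation); the equivalence proved here is about the return value.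

-- ===== PORT A =====
-- loop body of A: state is (answer, boats); `boats[-1]` is pyGet? boats (-1),
-- which is `none` exactly when `not boats` (A's first branch).
def stepA (limit : Int) (st : Int × List Int) (w : Int) : Int × List Int :=
  match PySem.List.pyGet? st.2 (-1) with
  | none => (st.1, st.2 ++ [w])                      -- if not boats: boats.append(weight)
  | some t =>
    if t + w ≤ limit then (st.1 + 1, st.2.dropLast)  -- boats.pop(); answer += 1
    else (st.1, st.2 ++ [w])                         -- boats.append(weight)

def solution (people : List Int) (limit : Int) : Int :=
  let ppl := PySem.List.sorted people (fun x => x) true   -- people.sort(reverse=True)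
  let fin := ppl.foldl (stepA limit) (0, ([] : List Int))
  fin.1 + (fin.2.length : Int)                            -- answer + len(boats)

-- ===== PORT B =====
-- while i <= j: (indices stay inside the list throughout, so the .getD 0 default is never used)
def tpLoop (people : List Int) (limit i j boats : Int) : Int :=
  if i ≤ j then
    if (PySem.List.pyGet? people i).getD 0 + (PySem.List.pyGet? people j).getD 0 ≤ limit then
      tpLoop people limit (i + 1) (j - 1) (boats + 1)
    else
      tpLoop people limit (i + 1) j (boats + 1)
  else boats
termination_by (j + 1 - i).toNat
decreasing_by all_goals omega

def solution_alt (people : List Int) (limit : Int) : Int :=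
  let ppl := PySem.List.sorted people (fun x => x) true   -- people.sort(reverse=True)
  tpLoop ppl limit 0 ((people.length : Int) - 1) 0        -- i, j = 0, len(people) - 1

-- ===== PRECONDITION & SPEC =====
def Spec_solution (people : List Int) (limit : Int) (out : Int) : Prop := out = solution_alt people limit
instance (people : List Int) (limit : Int) (out : Int) : Decidable (Spec_solution people limit out) := by unfold Spec_solution; infer_instance

-- ===== CLAIM (what is proved, stated in full; the proofs are below) =====
def Claim_equal_solution : Prop := ∀ (people : List Int) (limit : Int), Dom_solution people limit → Spec_solution people limit (solution people limit)

-- ===== LEMMAS AND PROOFS =====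

-- Proof-side reference function: the head/last "two-pointer" count on a list.
def TPl (limit : Int) : List Int → Nat
  | [] => 0
  | h :: rest =>
    if h + rest.getLastD h ≤ limit then 1 + TPl limit rest.dropLast
    else 1 + TPl limit rest
termination_by l => l.length
decreasing_by all_goals simp [List.length_dropLast]

lemma TPl_cons (limit h : Int) (rest : List Int) :
    TPl limit (h :: rest) =
      if h + rest.getLastD h ≤ limit then 1 + TPl limit rest.dropLast
      else 1 + TPl limit rest := by
  rw [TPl]

-- Proof-side reference function: A's stack loop (boats stack `s`, remaining people `r`);
-- returns the total number of boats contributed from this state on.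
def gA (limit : Int) : List Int → List Int → Nat
  | s, [] => s.length
  | s, w :: r =>
    match s.getLast? with
    | none => gA limit [w] r
    | some t => if t + w ≤ limit then 1 + gA limit s.dropLast r else gA limit (s ++ [w]) r

-- the last element of a sorted-descending list is a lower bound
lemma getLastD_mem_of_ne_nil (l : List Int) (d : Int) (hne : l ≠ []) : l.getLastD d ∈ l := by
  have hg : l.getLastD d = l.getLast hne := by
    rw [List.getLastD_eq_getLast?, List.getLast?_eq_some_getLast hne]; rfl
  rw [hg]; exact List.getLast_mem hne

lemma getLast_le_of_sorted :
    ∀ (s : List Int), s.Pairwise (fun a b => b ≤ a) →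
      ∀ (hne : s ≠ []), ∀ x ∈ s, s.getLast hne ≤ x := by
  intro s hs hne x hx
  obtain ⟨i, hi, rfl⟩ := List.getElem_of_mem hx
  rw [List.getLast_eq_getElem]
  rcases lt_or_ge i (s.length - 1) with h | h
  · exact List.pairwise_iff_getElem.mp hs i (s.length - 1) hi (by omega) h
  · have hieq : i = s.length - 1 := by omega
    subst hieq
    exact le_rfl

-- a list in which all pairs (in order) exceed the limit needs one boat per person
lemma TPl_big (limit : Int) :
    ∀ (s : List Int), s.Pairwise (fun a b => limit < a + b) → TPl limit s = s.length := by
  intro s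
  induction s with
  | nil => intro _; simp [TPl]
  | cons h rest ih =>
    intro hp
    cases rest with
    | nil => rw [TPl_cons]; split <;> simp [TPl]
    | cons b bs =>
      have hmem : (b :: bs).getLastD h ∈ b :: bs :=
        getLastD_mem_of_ne_nil (b :: bs) h (by simp)
      have hbig : limit < h + (b :: bs).getLastD h := (List.pairwise_cons.mp hp).1 _ hmem
      rw [TPl_cons, if_neg (by omega), ih (List.pairwise_cons.mp hp).2]
      simp
      omega

-- a sorted list in which everybody fits with everybody pairs up greedily: ⌈n/2⌉ boats
lemma TPl_light (limit : Int) :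
    ∀ (n : Nat) (l : List Int), l.length ≤ n → l.Pairwise (fun a b => b ≤ a) →
      (∀ x ∈ l, x + x ≤ limit) → TPl limit l = (l.length + 1) / 2 := by
  intro n
  induction n with
  | zero =>
    intro l hl _ _
    have : l = [] := List.length_eq_zero_iff.mp (by omega)
    subst this; simp [TPl]
  | succ n ih =>
    intro l hl hs hall
    cases l with
    | nil => simp [TPl]
    | cons h rest =>
      have hLmem : rest.getLastD h ∈ h :: rest := List.getLastD_mem_cons
      have hLle : rest.getLastD h ≤ h := by
        rcases List.mem_cons.mp hLmem with he | he
        · exact le_of_eq he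
        · exact (List.pairwise_cons.mp hs).1 _ he
      have hcond : h + rest.getLastD h ≤ limit := by
        have := hall h (by simp)
        omega
      rw [TPl_cons, if_pos hcond]
      have hsub : rest.dropLast.Sublist (h :: rest) :=
        (List.dropLast_sublist rest).trans (List.sublist_cons_self h rest)
      have := ih rest.dropLast (by simp [List.length_dropLast] at *; omega)
        (hs.sublist hsub) (fun x hx => hall x (hsub.mem hx))
      rw [this]
      simp [List.length_dropLast]
      omega

lemma getLastD_append_cons : ∀ (xs : List Int) (y : Int) (ys : List Int) (d : Int),
    (xs ++ y :: ys).getLastD d = ys.getLastD y := by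
  intro xs
  induction xs with
  | nil => intro y ys d; exact List.getLastD_cons
  | cons a xs ih =>
    intro y ys d
    rw [List.cons_append, List.getLastD_cons]
    exact ih y ys a

-- KEY exchange lemma: removing the adjacent feasible pair (t, w) from a sorted list whose
-- prefix (up to and including t) is pairwise infeasible costs exactly one boat.
lemma TPl_key (limit : Int) :
    ∀ (n : Nat) (s : List Int) (t w : Int) (r : List Int),
      (s ++ t :: w :: r).length ≤ n →
      (s ++ t :: w :: r).Pairwise (fun a b => b ≤ a) →
      (s ++ [t]).Pairwise (fun a b => limit < a + b) →
      t + w ≤ limit →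
      TPl limit (s ++ t :: w :: r) = 1 + TPl limit (s ++ r) := by
  intro n
  induction n with
  | zero =>
    intro s t w r hlen _ _ _
    exfalso
    simp [List.length_append] at hlen
  | succ n ih =>
    intro s t w r hlen hs hp htw
    cases s with
    | nil =>
      simp only [List.nil_append] at hs hp ⊢
      cases r with
      | nil =>
        rw [TPl_cons]
        have hgl : ((w :: []) : List Int).getLastD t = w := by
          rw [List.getLastD_cons]; rfl
        rw [hgl, if_pos htw]
        simp [TPl]
      | cons b bs =>
        have hs1 : (w :: b :: bs).Pairwise (fun a b => b ≤ a) := (List.pairwise_cons.mp hs).2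
        have hwt : w ≤ t := (List.pairwise_cons.mp hs).1 w (by simp)
        have hr_le_w : ∀ x ∈ b :: bs, x ≤ w := (List.pairwise_cons.mp hs1).1
        have hm_mem : (b :: bs).getLastD w ∈ b :: bs := getLastD_mem_of_ne_nil _ _ (by simp)
        have hm_le : (b :: bs).getLastD w ≤ w := hr_le_w _ hm_mem
        rw [TPl_cons]
        have hgl : (w :: b :: bs).getLastD t = (b :: bs).getLastD w :=
          List.getLastD_cons
        rw [hgl, if_pos (by omega), List.dropLast_cons₂]
        have hlight : ∀ x ∈ w :: b :: bs, x + x ≤ limit := by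
          intro x hx
          rcases List.mem_cons.mp hx with he | he
          · subst he; omega
          · have := hr_le_w x he; omega
        have hsub1 : (w :: (b :: bs).dropLast).Sublist (w :: b :: bs) :=
          List.Sublist.cons₂ w (List.dropLast_sublist _)
        have h1 := TPl_light limit (w :: (b :: bs).dropLast).length (w :: (b :: bs).dropLast)
          le_rfl (hs1.sublist hsub1) (fun x hx => hlight x (hsub1.mem hx))
        have h2 := TPl_light limit (b :: bs).length (b :: bs) le_rfl
          (List.pairwise_cons.mp hs1).2 (fun x hx => hlight x (by simp [hx]))
        rw [h1, h2]
        simp [List.length_dropLast]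
    | cons h s' =>
      rw [List.cons_append] at hs hp
      have hs_tail : (s' ++ t :: w :: r).Pairwise (fun a b => b ≤ a) :=
        (List.pairwise_cons.mp hs).2
      have hp' : (s' ++ [t]).Pairwise (fun a b => limit < a + b) :=
        (List.pairwise_cons.mp hp).2
      have hNhs' : TPl limit (h :: s') = (h :: s').length :=
        TPl_big limit _ (hp.sublist (List.sublist_append_left _ _))
      have hNs' : TPl limit s' = s'.length :=
        TPl_big limit _ (hp'.sublist (List.sublist_append_left _ _))
      cases r with
      | nil =>
        have hgl : (s' ++ t :: w :: ([] : List Int)).getLastD h = w := by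
          rw [getLastD_append_cons, List.getLastD_cons]; rfl
        have hdl : (s' ++ t :: w :: ([] : List Int)).dropLast = s' ++ [t] := by
          rw [show s' ++ t :: w :: ([] : List Int) = (s' ++ [t]) ++ [w] by simp]
          exact List.dropLast_concat
        have hNs't : TPl limit (s' ++ [t]) = (s' ++ [t]).length := TPl_big limit _ hp'
        by_cases hhw : h + w ≤ limit
        · have hLeq : TPl limit ((h :: s') ++ t :: w :: ([] : List Int))
              = 1 + TPl limit (s' ++ [t]) := by
            rw [List.cons_append, TPl_cons, hgl, if_pos hhw, hdl]
          rw [hLeq, hNs't]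
          simp only [List.append_nil]
          rw [hNhs']
          simp
        · have hLeq : TPl limit ((h :: s') ++ t :: w :: ([] : List Int))
              = 1 + TPl limit (s' ++ t :: w :: ([] : List Int)) := by
            rw [List.cons_append, TPl_cons, hgl, if_neg hhw]
          have hkey := ih s' t w [] (by simp [List.length_append] at hlen ⊢; omega)
            hs_tail hp' htw
          rw [hLeq, hkey]
          simp only [List.append_nil] at *
          rw [hNs', hNhs']
          simp
          omega
      | cons b bs =>
        have hgl : (s' ++ t :: w :: b :: bs).getLastD h = bs.getLastD b := by
          rw [getLastD_append_cons, List.getLastD_cons, List.getLastD_cons]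
        have hgl2 : (s' ++ b :: bs).getLastD h = bs.getLastD b := by
          rw [getLastD_append_cons]
        by_cases hhm : h + bs.getLastD b ≤ limit
        · have hdl : (s' ++ t :: w :: b :: bs).dropLast
              = s' ++ t :: w :: (b :: bs).dropLast := by
            rw [List.dropLast_append_of_ne_nil (by simp), List.dropLast_cons₂,
              List.dropLast_cons₂]
          have hsubd : (s' ++ t :: w :: (b :: bs).dropLast).Sublist (s' ++ t :: w :: b :: bs) :=
            (List.Sublist.refl s').append
              (List.Sublist.cons₂ t (List.Sublist.cons₂ w (List.dropLast_sublist _)))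
          have hkey := ih s' t w ((b :: bs).dropLast)
            (by simp [List.length_append, List.length_dropLast] at hlen ⊢; omega)
            (hs_tail.sublist hsubd) hp' htw
          have hLeq : TPl limit ((h :: s') ++ t :: w :: b :: bs)
              = 1 + TPl limit (s' ++ t :: w :: (b :: bs).dropLast) := by
            rw [List.cons_append, TPl_cons, hgl, if_pos hhm, hdl]
          have hReq : TPl limit ((h :: s') ++ b :: bs)
              = 1 + TPl limit (s' ++ (b :: bs).dropLast) := by
            rw [List.cons_append, TPl_cons, hgl2, if_pos hhm,
              List.dropLast_append_of_ne_nil (by simp)]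
          rw [hLeq, hReq, hkey]
        · have hkey := ih s' t w (b :: bs)
            (by simp [List.length_append] at hlen ⊢; omega) hs_tail hp' htw
          have hLeq : TPl limit ((h :: s') ++ t :: w :: b :: bs)
              = 1 + TPl limit (s' ++ t :: w :: b :: bs) := by
            rw [List.cons_append, TPl_cons, hgl, if_neg hhm]
          have hReq : TPl limit ((h :: s') ++ b :: bs)
              = 1 + TPl limit (s' ++ b :: bs) := by
            rw [List.cons_append, TPl_cons, hgl2, if_neg hhm]
          rw [hLeq, hReq, hkey]

-- simulation: A's stack loop equals the two-pointer count of stack ++ remaining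
lemma gA_eq_TPl (limit : Int) :
    ∀ (r s : List Int), (s ++ r).Pairwise (fun a b => b ≤ a) →
      s.Pairwise (fun a b => limit < a + b) →
      gA limit s r = TPl limit (s ++ r) := by
  intro r
  induction r with
  | nil =>
    intro s hs hp
    rw [show gA limit s [] = s.length from by rw [gA], List.append_nil]
    exact (TPl_big limit s hp).symm
  | cons w r' ih =>
    intro s hs hp
    cases s with
    | nil =>
      rw [show gA limit [] (w :: r') = gA limit [w] r' from by rw [gA]; simp]
      simp only [List.nil_append] at hs ⊢
      have := ih [w] (by simpa using hs) (by simp)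
      simpa using this
    | cons c cs =>
      have hne : (c :: cs : List Int) ≠ [] := by simp
      have hgA : gA limit (c :: cs) (w :: r') =
          if (c :: cs).getLast hne + w ≤ limit then 1 + gA limit (c :: cs).dropLast r'
          else gA limit ((c :: cs) ++ [w]) r' := by
        rw [gA, List.getLast?_eq_some_getLast hne]
      have hdl : (c :: cs).dropLast ++ [(c :: cs).getLast hne] = c :: cs :=
        List.dropLast_append_getLast hne
      by_cases htw : (c :: cs).getLast hne + w ≤ limit
      · rw [hgA, if_pos htw]
        have hsub : ((c :: cs).dropLast ++ r').Sublist ((c :: cs) ++ (w :: r')) :=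
          (List.dropLast_sublist _).append (List.sublist_cons_self _ _)
        have hih := ih (c :: cs).dropLast (hs.sublist hsub) (hp.sublist (List.dropLast_sublist _))
        rw [hih]
        have hrw : (c :: cs) ++ (w :: r') = (c :: cs).dropLast ++ (c :: cs).getLast hne :: w :: r' := by
          conv_lhs => rw [← hdl]
          rw [List.append_assoc]
          rfl
        rw [hrw]
        have hs' : ((c :: cs).dropLast ++ (c :: cs).getLast hne :: w :: r').Pairwise
            (fun a b => b ≤ a) := by rw [← hrw]; exact hs
        have hp' : ((c :: cs).dropLast ++ [(c :: cs).getLast hne]).Pairwise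
            (fun a b => limit < a + b) := by rw [hdl]; exact hp
        rw [TPl_key limit ((c :: cs).dropLast ++ (c :: cs).getLast hne :: w :: r').length
          (c :: cs).dropLast _ w r' le_rfl hs' hp' htw]
      · rw [hgA, if_neg htw]
        have hsorted_ccs : (c :: cs).Pairwise (fun a b => b ≤ a) :=
          hs.sublist (List.sublist_append_left _ _)
        have hp2 : ((c :: cs) ++ [w]).Pairwise (fun a b => limit < a + b) := by
          rw [List.pairwise_append]
          refine ⟨hp, by simp, ?_⟩
          intro x hx y hy
          simp only [List.mem_singleton] at hy
          subst hy
          have hxt := getLast_le_of_sorted (c :: cs) hsorted_ccs hne x hx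
          omega
        have hs2 : (((c :: cs) ++ [w]) ++ r').Pairwise (fun a b => b ≤ a) := by
          rw [List.append_assoc]
          exact hs
        have hih := ih ((c :: cs) ++ [w]) hs2 hp2
        rw [hih, List.append_assoc]
        rfl

lemma stepA_nil (limit a w : Int) : stepA limit (a, []) w = (a, [w]) := by
  unfold stepA
  rw [PySem.List.pyGet?_neg_one]
  rfl

lemma stepA_cons (limit a w c : Int) (cs : List Int) :
    stepA limit (a, c :: cs) w =
      if (c :: cs).getLast (by simp) + w ≤ limit then (a + 1, (c :: cs).dropLast)
      else (a, (c :: cs) ++ [w]) := by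
  unfold stepA
  rw [PySem.List.pyGet?_neg_one, List.getLast?_eq_some_getLast (l := c :: cs) (by simp)]

-- A's fold produces gA
lemma foldA_eq (limit : Int) :
    ∀ (r : List Int) (a : Int) (s : List Int),
      (r.foldl (stepA limit) (a, s)).1 + ((r.foldl (stepA limit) (a, s)).2.length : Int)
        = a + (gA limit s r : Int) := by
  intro r
  induction r with
  | nil => intro a s; simp [gA]
  | cons w r' ih =>
    intro a s
    cases s with
    | nil =>
      rw [List.foldl_cons, stepA_nil]
      rw [show gA limit [] (w :: r') = gA limit [w] r' from by rw [gA]; simp]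
      exact ih a [w]
    | cons c cs =>
      rw [List.foldl_cons, stepA_cons]
      rw [show gA limit (c :: cs) (w :: r') =
            (if (c :: cs).getLast (by simp) + w ≤ limit then 1 + gA limit (c :: cs).dropLast r'
             else gA limit ((c :: cs) ++ [w]) r') from by
        rw [gA, List.getLast?_eq_some_getLast (l := c :: cs) (by simp)]]
      by_cases hc : (c :: cs).getLast (by simp) + w ≤ limit
      · rw [if_pos hc, if_pos hc]
        rw [ih (a + 1) (c :: cs).dropLast]
        push_cast
        ring
      · rw [if_neg hc, if_neg hc]
        exact ih a ((c :: cs) ++ [w])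

-- B's loop produces TPl of the segment [i, j]
lemma tpLoop_eq (limit : Int) :
    ∀ (n : Nat) (l : List Int) (i j b : Int), 0 ≤ i → j < (l.length : Int) →
      (j + 1 - i).toNat = n →
      tpLoop l limit i j b = b + (TPl limit ((l.drop i.toNat).take (j + 1 - i).toNat) : Int) := by
  intro n
  induction n using Nat.strong_induction_on with
  | _ n ih =>
    intro l i j b hi hj hn
    rw [tpLoop]
    by_cases hij : i ≤ j
    · rw [if_pos hij]
      have hiN : i.toNat < l.length := by omega
      have hjN : j.toNat < l.length := by omega
      have hgi : (PySem.List.pyGet? l i).getD 0 = l[i.toNat] := by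
        rw [PySem.List.pyGet?_eq_some_getElem l hi (by omega)]; rfl
      have hgj : (PySem.List.pyGet? l j).getD 0 = l[j.toNat] := by
        rw [PySem.List.pyGet?_eq_some_getElem l (by omega) (by omega)]; rfl
      set k := (j + 1 - i).toNat with hk
      have hk1 : 1 ≤ k := by omega
      have hkla : i.toNat + k ≤ l.length := by omega
      have hseg : (l.drop i.toNat).take k = l[i.toNat] :: ((l.drop (i.toNat + 1)).take (k - 1)) := by
        obtain ⟨k', hk'⟩ : ∃ k', k = k' + 1 := ⟨k - 1, by omega⟩
        rw [hk', List.drop_eq_getElem_cons hiN, List.take_succ_cons]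
        simp only [Nat.add_sub_cancel]
      have hlast : ((l.drop (i.toNat + 1)).take (k - 1)).getLastD l[i.toNat] = l[j.toNat] := by
        by_cases hk2 : k = 1
        · rw [hk2]
          simp only [Nat.sub_self, List.take_zero, List.getLastD_nil]
          have hij2 : i.toNat = j.toNat := by omega
          simp only [hij2]
        · have hxlen : ((l.drop (i.toNat + 1)).take (k - 1)).length = k - 1 := by
            simp [List.length_take, List.length_drop]
            omega
          rw [List.getLastD_eq_getLast?, List.getLast?_eq_getElem?, hxlen]
          have hidx : k - 1 - 1 < ((l.drop (i.toNat + 1)).take (k - 1)).length := by omega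
          rw [List.getElem?_eq_getElem hidx]
          simp only [Option.getD_some, List.getElem_take, List.getElem_drop]
          have hidx2 : i.toNat + 1 + (k - 1 - 1) = j.toNat := by omega
          simp only [hidx2]
      rw [hgi, hgj]
      by_cases hcond : l[i.toNat] + l[j.toNat] ≤ limit
      · rw [if_pos hcond]
        have hrec := ih ((j - 1) + 1 - (i + 1)).toNat (by omega) l (i + 1) (j - 1) (b + 1)
          (by omega) (by omega) rfl
        rw [show ((i : Int) + 1).toNat = i.toNat + 1 from by omega,
          show ((j : Int) - 1 + 1 - (i + 1)).toNat = k - 2 from by omega] at hrec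
        have hTP : TPl limit ((l.drop i.toNat).take k)
            = 1 + TPl limit ((l.drop (i.toNat + 1)).take (k - 2)) := by
          rw [hseg, TPl_cons, hlast, if_pos hcond]
          congr 1
          rw [List.dropLast_eq_take,
            show ((l.drop (i.toNat + 1)).take (k - 1)).length = k - 1 from by
              simp [List.length_take, List.length_drop]; omega,
            List.take_take]
          congr 2
          omega
        rw [hrec, hTP]
        push_cast
        ring
      · rw [if_neg hcond]
        have hrec := ih (j + 1 - (i + 1)).toNat (by omega) l (i + 1) j (b + 1)
          (by omega) hj rfl
        rw [show ((i : Int) + 1).toNat = i.toNat + 1 from by omega,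
          show ((j : Int) + 1 - (i + 1)).toNat = k - 1 from by omega] at hrec
        have hTP : TPl limit ((l.drop i.toNat).take k)
            = 1 + TPl limit ((l.drop (i.toNat + 1)).take (k - 1)) := by
          rw [hseg, TPl_cons, hlast, if_neg hcond]
        rw [hrec, hTP]
        push_cast
        ring
    · rw [if_neg hij]
      rw [show (j + 1 - i).toNat = 0 from by omega]
      simp [TPl]

lemma solution_eq_alt (people : List Int) (limit : Int) :
    solution people limit = solution_alt people limit := by
  unfold solution solution_alt
  have hsort : (PySem.List.sorted people (fun x => x) true).Pairwise (fun a b => b ≤ a) :=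
    PySem.List.sorted_pairwise_rev people (fun x => x)
  have hlen : (PySem.List.sorted people (fun x => x) true).length = people.length :=
    PySem.List.length_sorted people (fun x => x) true
  set l := PySem.List.sorted people (fun x => x) true with hl
  have hA := foldA_eq limit l 0 []
  have hg := gA_eq_TPl limit l [] (by simpa using hsort) (by simp)
  simp only [List.nil_append] at hg
  have hj : ((people.length : Int) - 1) < (l.length : Int) := by omega
  have hB := tpLoop_eq limit ((people.length : Int) - 1 + 1 - 0).toNat l 0
    ((people.length : Int) - 1) 0 le_rfl hj rfl
  have htn : ((people.length : Int) - 1 + 1 - 0).toNat = l.length := by omega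
  rw [htn] at hB
  simp only [Int.toNat_zero, List.drop_zero, List.take_length] at hB
  show (List.foldl (stepA limit) (0, ([] : List Int)) l).1
      + (((List.foldl (stepA limit) (0, ([] : List Int)) l).2.length : Nat) : Int)
    = tpLoop l limit 0 ((people.length : Int) - 1) 0
  omega

-- ===== VERDICT (by name: the statement is the Claim_ definition above) =====
theorem solution_spec : Claim_equal_solution := by
  intro people limit _
  unfold Spec_solution
  exact solution_eq_alt people limit
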